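-- pv_equiv track=rewrite | github.com/d-avidgold/evil-tetris | maxrowtris.py | all_boards_with_n_pieces
-- ===== SOURCE A (Python) =====
-- def all_boards_with_n_pieces(n, max_height):
-- 	ls = []
-- 	for first_col in range(min(max_height, 3 * n) + 1):
-- 		remaining_blocks = 3 * n - first_col
-- 		for second_col in range(min(max_height, remaining_blocks) + 1):
-- 			third_col = remaining_blocks - second_col
-- 			if third_col <= max_height:
-- 				ls.append([first_col, second_col, third_col])
--
-- 	return(ls)
-- ===== SOURCE B (Python) =====
-- def all_boards_with_n_pieces(n, max_height):
-- 	def cols(k, rem):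
-- 		if k == 1:
-- 			return [[rem]] if 0 <= rem <= max_height else []
-- 		out = []
-- 		for v in range(min(max_height, rem) + 1):
-- 			sub = cols(k - 1, rem - v)
-- 			if sub:
-- 				pre = [v]
-- 				out += [pre + rest for rest in sub]
-- 		return out
-- 	return cols(3, 3 * n)
-- ===== Notes on version B (the rewrite author's own statement) =====
-- stated objective: alternative
-- what changed: B replaces A's fixed pair of nested loops with a filter by a recursive k-column composition generator cols(k, rem) that builds each board by prepending a column value to the recursively generated shorter boards.
import Mathlib
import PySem

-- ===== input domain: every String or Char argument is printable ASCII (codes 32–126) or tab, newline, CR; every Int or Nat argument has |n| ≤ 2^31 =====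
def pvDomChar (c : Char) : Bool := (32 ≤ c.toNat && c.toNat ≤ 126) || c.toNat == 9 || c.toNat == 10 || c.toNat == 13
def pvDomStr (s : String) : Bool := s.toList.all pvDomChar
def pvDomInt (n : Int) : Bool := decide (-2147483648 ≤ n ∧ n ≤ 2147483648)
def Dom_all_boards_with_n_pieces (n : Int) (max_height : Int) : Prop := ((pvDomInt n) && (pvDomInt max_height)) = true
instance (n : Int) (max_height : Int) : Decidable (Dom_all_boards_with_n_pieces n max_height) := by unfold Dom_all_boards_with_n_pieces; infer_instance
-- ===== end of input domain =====

-- B generates the boards by recursion on the number of columns (a general k-column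
-- composition generator) instead of A's fixed pair of nested loops with a filter.

-- ===== PORT A =====
def all_boards_with_n_pieces (n : Int) (max_height : Int) : List (List Int) :=
  (PySem.List.pyRange 0 (min max_height (3*n) + 1) 1).foldl (fun ls first_col =>
    let remaining_blocks := 3*n - first_col
    (PySem.List.pyRange 0 (min max_height remaining_blocks + 1) 1).foldl (fun ls second_col =>
      let third_col := remaining_blocks - second_col
      if third_col ≤ max_height then ls ++ [[first_col, second_col, third_col]] else ls) ls) []

-- ===== PORT B =====
-- Source B's recursive helper cols(k, rem); the k = 0 case is unreachable from the port's
-- call (k starts at 3 and the base case is k = 1) and returns [] for totality only.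
def pvCols (mh : Int) : Nat → Int → List (List Int)
  | 0, _ => []
  | 1, rem => if 0 ≤ rem ∧ rem ≤ mh then [[rem]] else []
  | (k+2), rem =>
      (PySem.List.pyRange 0 (min mh rem + 1) 1).foldl (fun out v =>
        let sub := pvCols mh (k+1) (rem - v)
        if sub ≠ [] then out ++ sub.map (fun rest => [v] ++ rest) else out) []

def all_boards_with_n_pieces_alt (n : Int) (max_height : Int) : List (List Int) :=
  pvCols max_height 3 (3*n)

-- ===== PRECONDITION & SPEC =====
def Spec_all_boards_with_n_pieces (n : Int) (max_height : Int) (out : List (List Int)) : Prop := out = all_boards_with_n_pieces_alt n max_height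
instance (n : Int) (max_height : Int) (out : List (List Int)) : Decidable (Spec_all_boards_with_n_pieces n max_height out) := by unfold Spec_all_boards_with_n_pieces; infer_instance

-- ===== CLAIM =====
def Claim_equal_all_boards_with_n_pieces : Prop := ∀ (n : Int) (max_height : Int), Dom_all_boards_with_n_pieces n max_height → Spec_all_boards_with_n_pieces n max_height (all_boards_with_n_pieces n max_height)

-- ===== LEMMAS AND PROOFS =====

lemma flatMap_ite_singleton {α β : Type} (p : α → Bool) (g : α → β) (l : List α) :
    l.flatMap (fun x => if p x then [g x] else []) = (l.filter p).map g := by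
  induction l with
  | nil => rfl
  | cons a t ih => by_cases h : p a <;> simp [List.flatMap_cons, h, ih]

lemma flatMap_congr_mem {α β : Type} (l : List α) (f g : α → List β)
    (h : ∀ x ∈ l, f x = g x) : l.flatMap f = l.flatMap g := by
  induction l with
  | nil => rfl
  | cons a t ih =>
    simp only [List.flatMap_cons]
    rw [h a (List.mem_cons_self), ih (fun x hx => h x (List.mem_cons_of_mem _ hx))]

-- pvCols's append loop (with its skip of empty sublists) is a flatMap
lemma cols_step (mh : Int) (k : Nat) (rem : Int) :
    pvCols mh (k+2) rem
      = (PySem.List.pyRange 0 (min mh rem + 1) 1).flatMap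
          (fun v => (pvCols mh (k+1) (rem - v)).map (fun rest => [v] ++ rest)) := by
  have h : pvCols mh (k+2) rem
      = (PySem.List.pyRange 0 (min mh rem + 1) 1).foldl (fun out v =>
          let sub := pvCols mh (k+1) (rem - v)
          if sub ≠ [] then out ++ sub.map (fun rest => [v] ++ rest) else out) [] := rfl
  rw [h, ← List.nil_append ((PySem.List.pyRange 0 (min mh rem + 1) 1).flatMap _),
      ← PySem.List.foldl_append_eq_flatMap]
  apply PySem.List.foldl_congr_mem
  intro acc v _
  by_cases hs : pvCols mh (k+1) (rem - v) = [] <;> simp [hs]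

-- the two-column generator produces exactly A's inner filtered scan, with 'first' prepended
lemma cols2_map (mh rem first : Int) :
    (pvCols mh 2 rem).map (fun rest => [first] ++ rest)
    = ((PySem.List.pyRange 0 (min mh rem + 1) 1).filter
        (fun s => decide (rem - s ≤ mh))).map (fun s => [first, s, rem - s]) := by
  have h2 : pvCols mh 2 rem
      = (PySem.List.pyRange 0 (min mh rem + 1) 1).flatMap
          (fun v => (pvCols mh 1 (rem - v)).map (fun rest => [v] ++ rest)) := cols_step mh 0 rem
  rw [h2, List.map_flatMap, ← flatMap_ite_singleton (fun s => decide (rem - s ≤ mh))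
        (fun s => [first, s, rem - s])]
  apply flatMap_congr_mem
  intro v hv
  have hm := (PySem.List.mem_pyRange_one).mp hv
  have h0 : 0 ≤ rem - v := by omega
  have h1 : pvCols mh 1 (rem - v) = if 0 ≤ rem - v ∧ rem - v ≤ mh then [[rem - v]] else [] := rfl
  rw [h1]
  by_cases hc : rem - v ≤ mh <;> simp [hc] <;> omega

-- ===== VERDICT =====
theorem all_boards_with_n_pieces_spec : Claim_equal_all_boards_with_n_pieces := by
  intro n mh _
  unfold Spec_all_boards_with_n_pieces all_boards_with_n_pieces all_boards_with_n_pieces_alt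
  have h3 : pvCols mh 3 (3*n)
      = (PySem.List.pyRange 0 (min mh (3*n) + 1) 1).flatMap
          (fun v => (pvCols mh 2 (3*n - v)).map (fun rest => [v] ++ rest)) := cols_step mh 1 (3*n)
  rw [h3]
  calc (PySem.List.pyRange 0 (min mh (3*n) + 1) 1).foldl (fun ls first_col =>
          let remaining_blocks := 3*n - first_col
          (PySem.List.pyRange 0 (min mh remaining_blocks + 1) 1).foldl (fun ls second_col =>
            let third_col := remaining_blocks - second_col
            if third_col ≤ mh then ls ++ [[first_col, second_col, third_col]] else ls) ls) []
      = (PySem.List.pyRange 0 (min mh (3*n) + 1) 1).foldl (fun ls first_col =>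
          ls ++ ((PySem.List.pyRange 0 (min mh (3*n - first_col) + 1) 1).filter
              (fun s => decide (3*n - first_col - s ≤ mh))).map
            (fun s => [first_col, s, 3*n - first_col - s])) [] := by
        apply PySem.List.foldl_congr_mem
        intro acc first _
        exact PySem.List.foldl_append_ite _ _ _ _
    _ = (PySem.List.pyRange 0 (min mh (3*n) + 1) 1).flatMap (fun first_col =>
          ((PySem.List.pyRange 0 (min mh (3*n - first_col) + 1) 1).filter
              (fun s => decide (3*n - first_col - s ≤ mh))).map
            (fun s => [first_col, s, 3*n - first_col - s])) := by
        rw [PySem.List.foldl_append_eq_flatMap, List.nil_append]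
    _ = (PySem.List.pyRange 0 (min mh (3*n) + 1) 1).flatMap
          (fun v => (pvCols mh 2 (3*n - v)).map (fun rest => [v] ++ rest)) := by
        apply flatMap_congr_mem
        intro v _
        rw [cols2_map]
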